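-- pv_equiv track=rewrite | github.com/hossainrafiu/MIE444-Localization-Code | histogram_localization_robot_auto_cont.py | block_type_detected
-- ===== SOURCE A (Python) =====
-- def block_type_detected(readings: list) -> int:
--     WALL_THRESHOLD = 180
--     walls = [1 if reading < WALL_THRESHOLD else 0 for reading in readings]
--     if sum(walls) == 2:
--         for i in range(4):
--             if walls[i] == 1:
--                 if walls[i - 1] == 1:
--                     return 2
--         return 5
--     else:
--         return sum(walls)
-- ===== SOURCE B (Python) =====
-- def block_type_detected(readings: list) -> int:
--     WALL_THRESHOLD = 180
--     walls = [1 if reading < WALL_THRESHOLD else 0 for reading in readings]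
--     s = sum(walls)
--     if s != 2:
--         return s
--     return 5 if (walls[0] and walls[2]) or (walls[1] and walls[3]) else 2
-- ===== Notes on version B (the rewrite author's own statement) =====
-- stated objective: simpler
-- what changed: Replaced A's circular range(4) adjacency scan with its post-loop sentinel 'return 5' by a single direct opposite-pair boolean test ((walls[0] and walls[2]) or (walls[1] and walls[3])), keeping the same wall threshold and sum dispatch.
-- outside the precondition, e.g. on block_type_detected([100, 100, 200]): A returns 2, B raises IndexError; on block_type_detected([200, 100, 200, 200, 100]): A returns 5, B returns 2
import Mathlib
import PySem

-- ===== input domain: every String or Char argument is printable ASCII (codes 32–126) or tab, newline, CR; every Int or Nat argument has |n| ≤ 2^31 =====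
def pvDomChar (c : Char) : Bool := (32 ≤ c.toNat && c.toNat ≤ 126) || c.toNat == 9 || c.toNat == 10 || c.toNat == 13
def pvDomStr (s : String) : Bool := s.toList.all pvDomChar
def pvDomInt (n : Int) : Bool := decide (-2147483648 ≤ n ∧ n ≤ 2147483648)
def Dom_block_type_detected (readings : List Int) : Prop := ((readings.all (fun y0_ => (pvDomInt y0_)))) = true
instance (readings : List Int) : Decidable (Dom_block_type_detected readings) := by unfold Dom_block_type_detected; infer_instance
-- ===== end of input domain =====

-- B replaces A's circular range(4) adjacency scan (with its sentinel 'return 5') by one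
-- direct opposite-pair boolean test; objective: simpler.


-- ===== PORT A =====
-- the for-i-in-range(4) loop; walls[i] / walls[i-1] via Python indexing (negative wraps);
-- .getD 0 is only reached on inputs excluded by Pre_ (where Python raises IndexError)
def btdLoop (walls : List Int) : List Int → Int
  | [] => 5
  | i :: rest =>
    if (PySem.List.pyGet? walls i).getD 0 = 1 then
      if (PySem.List.pyGet? walls (i - 1)).getD 0 = 1 then 2
      else btdLoop walls rest
    else btdLoop walls rest

def block_type_detected (readings : List Int) : Int :=
  let walls : List Int := readings.map (fun r => if r < 180 then 1 else 0)
  if walls.sum = 2 then btdLoop walls [0, 1, 2, 3]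
  else walls.sum

-- ===== PORT B =====
def block_type_detected_alt (readings : List Int) : Int :=
  let walls : List Int := readings.map (fun r => if r < 180 then 1 else 0)
  let s := walls.sum
  if s ≠ 2 then s
  else if ((PySem.List.pyGet? walls 0).getD 0 ≠ 0 ∧ (PySem.List.pyGet? walls 2).getD 0 ≠ 0)
        ∨ ((PySem.List.pyGet? walls 1).getD 0 ≠ 0 ∧ (PySem.List.pyGet? walls 3).getD 0 ≠ 0)
  then 5 else 2

-- ===== PRECONDITION & SPEC =====
-- Pre_ excludes readings lists whose length is not 4 while exactly two readings are below 180: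
-- there A's range(4) loop with negative-index wraparound either raises IndexError or returns an
-- accidental classification of a non-4-reading input, and B raises or classifies only the first four.
def Pre_block_type_detected (readings : List Int) : Prop :=
  readings.length = 4 ∨ readings.countP (fun r => decide (r < 180)) ≠ 2
instance (readings : List Int) : Decidable (Pre_block_type_detected readings) := by unfold Pre_block_type_detected; infer_instance
def pvWitness_block_type_detected : List Int := [100, 200, 100, 200]
def Spec_block_type_detected (readings : List Int) (out : Int) : Prop := out = block_type_detected_alt readings
instance (readings : List Int) (out : Int) : Decidable (Spec_block_type_detected readings out) := by unfold Spec_block_type_detected; infer_instance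

-- ===== CLAIM (what is proved, stated in full; the proofs are below) =====
def Claim_equal_block_type_detected : Prop := ∀ (readings : List Int), Dom_block_type_detected readings → Pre_block_type_detected readings → Spec_block_type_detected readings (block_type_detected readings)

-- ===== LEMMAS AND PROOFS =====
theorem walls_sum_eq_countP (readings : List Int) :
    (readings.map (fun r => if r < 180 then (1 : Int) else 0)).sum
      = (readings.countP (fun r => decide (r < 180)) : Int) := by
  induction readings with
  | nil => simp
  | cons x xs ih =>
    by_cases h : x < 180 <;>
      simp [List.countP_cons, ih, h] <;> push_cast <;> ring

-- ===== VERDICT (by name: the statement is the Claim_ definition above) =====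
theorem block_type_detected_spec : Claim_equal_block_type_detected := by
  intro readings _ hpre
  unfold Spec_block_type_detected
  rcases hpre with hlen | hcnt
  · match readings, hlen with
    | [a, b, c, d], _ =>
      by_cases h1 : a < 180 <;> by_cases h2 : b < 180 <;> by_cases h3 : c < 180 <;>
        by_cases h4 : d < 180 <;>
        simp [block_type_detected, block_type_detected_alt, btdLoop,
          PySem.List.pyGet?, PySem.List.pyIdx?, h1, h2, h3, h4]
  · have hsum : (readings.map (fun r => if r < 180 then (1 : Int) else 0)).sum ≠ 2 := by
      rw [walls_sum_eq_countP]
      exact_mod_cast fun h => hcnt (by exact_mod_cast h)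
    simp [block_type_detected, block_type_detected_alt, hsum]
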